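-- pv_equiv track=rewrite | github.com/beamable/docnerd | docnerd/docs_fetcher.py | _prioritize_md_paths
-- ===== SOURCE A (Python) =====
-- def _prioritize_md_paths(
--     paths: list[str],
--     prioritize_terms: list[str] | None,
--     max_files: int,
-- ) -> list[str]:
--     """
--     Rank paths so PR-relevant docs (e.g. cli/, deploy) are kept when max_files caps the set.
--
--     Plain alphabetical order often drops entire subtrees (e.g. docs/cli/...) when the repo
--     has many markdown files earlier in the sort.
--     """
--     if not paths or max_files <= 0:
--         return []
--     if not prioritize_terms:
--         return sorted(paths)[:max_files]
--
--     tlow = [t.lower() for t in prioritize_terms if len(t) >= 2]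
--     scored: list[tuple[int, str]] = []
--     for p in paths:
--         pl = p.lower()
--         score = sum(1 for t in tlow if t in pl)
--         scored.append((-score, p))
--     scored.sort()
--     ordered = [p for _, p in scored]
--     return ordered[:max_files]
-- ===== SOURCE B (Python) =====
-- def _prioritize_md_paths(
--     paths: list[str],
--     prioritize_terms: list[str] | None,
--     max_files: int,
-- ) -> list[str]:
--     # Sort alphabetically ONCE up front, then emit paths grouped by descending
--     # match-score with a filtering pass per distinct score; the alphabetical
--     # tie-break comes for free from the pre-sort (no (-score, path) decoration).
--     if not paths or max_files <= 0:
--         return []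
--     ordered = sorted(paths)
--     if not prioritize_terms:
--         return ordered[:max_files]
--
--     tlow = [t.lower() for t in prioritize_terms if len(t) >= 2]
--     scores = [len([t for t in tlow if t in p.lower()]) for p in ordered]
--     out: list[str] = []
--     for s in sorted(set(scores), reverse=True):
--         out += [p for p, sc in zip(ordered, scores) if sc == s]
--     return out[:max_files]
-- ===== Notes on version B (the rewrite author's own statement) =====
-- stated objective: alternative
-- what changed: Replaces A's decorate-with-(-score,path)-and-globally-sort pipeline by one up-front alphabetical sort followed by per-distinct-score filtering passes emitted in descending score order (the pre-sort supplies the alphabetical tie-break), with the score computed as the length of a filtered term list instead of a generator sum.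
import Mathlib
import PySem

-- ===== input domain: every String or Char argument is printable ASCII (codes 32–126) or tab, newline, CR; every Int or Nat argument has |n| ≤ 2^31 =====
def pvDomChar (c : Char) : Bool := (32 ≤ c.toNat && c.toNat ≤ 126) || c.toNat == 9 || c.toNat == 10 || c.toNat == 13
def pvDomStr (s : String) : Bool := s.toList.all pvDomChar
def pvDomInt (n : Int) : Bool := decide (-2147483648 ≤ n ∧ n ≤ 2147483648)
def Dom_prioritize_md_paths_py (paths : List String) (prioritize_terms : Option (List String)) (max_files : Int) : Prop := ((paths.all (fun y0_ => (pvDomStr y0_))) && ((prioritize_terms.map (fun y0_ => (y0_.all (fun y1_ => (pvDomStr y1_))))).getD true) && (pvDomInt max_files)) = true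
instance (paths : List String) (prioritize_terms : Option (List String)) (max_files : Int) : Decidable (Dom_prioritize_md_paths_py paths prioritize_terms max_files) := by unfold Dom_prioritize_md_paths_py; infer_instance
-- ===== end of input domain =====

-- B sorts the paths alphabetically once up front and then emits per-distinct-score filtering
-- passes in descending score order, instead of A's global sort of (-score, path) pairs.

-- ===== PORT A =====
-- tlow = [t.lower() for t in prioritize_terms if len(t) >= 2]
def pvTlow (ts : List String) : List String :=
  (ts.filter (fun t => 2 ≤ PySem.Str.len t)).map PySem.Str.lower

-- score = sum(1 for t in tlow if t in p.lower())
def pvScore (tlow : List String) (p : String) : Int :=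
  tlow.foldl (fun acc t => if PySem.Str.isIn t (PySem.Str.lower p) then acc + 1 else acc) 0

def prioritize_md_paths_py (paths : List String) (prioritize_terms : Option (List String)) (max_files : Int) : List String :=
  if paths = [] ∨ max_files ≤ 0 then []
  else
    match prioritize_terms with
    | none => PySem.List.slice (PySem.List.sorted paths (fun x => x)) none (some max_files)
    | some ts =>
      if ts = [] then PySem.List.slice (PySem.List.sorted paths (fun x => x)) none (some max_files)
      else
        let tlow := pvTlow ts
        let scored := paths.foldl (fun acc p => acc ++ [(-(pvScore tlow p), p)]) []
        let sortedScored := PySem.List.sorted2 scored Prod.fst Prod.snd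
        let ordered := sortedScored.map Prod.snd
        PySem.List.slice ordered none (some max_files)

-- ===== PORT B =====
-- score for B: len([t for t in tlow if t in p.lower()])
def pvScoreB (tlow : List String) (p : String) : Int :=
  ((tlow.filter (fun t => PySem.Str.isIn t (PySem.Str.lower p))).length : Int)

def prioritize_md_paths_py_alt (paths : List String) (prioritize_terms : Option (List String)) (max_files : Int) : List String :=
  if paths = [] ∨ max_files ≤ 0 then []
  else
    let ordered := PySem.List.sorted paths (fun x => x)
    match prioritize_terms with
    | none => PySem.List.slice ordered none (some max_files)
    | some ts =>
      if ts = [] then PySem.List.slice ordered none (some max_files)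
      else
        let tlow := ts.filterMap (fun t => if 2 ≤ PySem.Str.len t then some (PySem.Str.lower t) else none)
        let scores := ordered.map (fun p => pvScoreB tlow p)
        -- for s in sorted(set(scores), reverse=True): out += [p for p, sc in zip(ordered, scores) if sc == s]
        let out := (PySem.List.sorted (PySem.Set.ofList scores) (fun s => s) true).foldl
          (fun acc s => acc ++ ((ordered.zip scores).filter (fun q => q.2 == s)).map Prod.fst) []
        PySem.List.slice out none (some max_files)

-- ===== PRECONDITION & SPEC =====
def Spec_prioritize_md_paths_py (paths : List String) (prioritize_terms : Option (List String)) (max_files : Int) (out : List String) : Prop := out = prioritize_md_paths_py_alt paths prioritize_terms max_files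
instance (paths : List String) (prioritize_terms : Option (List String)) (max_files : Int) (out : List String) : Decidable (Spec_prioritize_md_paths_py paths prioritize_terms max_files out) := by unfold Spec_prioritize_md_paths_py; infer_instance

-- ===== CLAIM (what is proved, stated in full; the proofs are below) =====
def Claim_equal_prioritize_md_paths_py : Prop := ∀ (paths : List String) (prioritize_terms : Option (List String)) (max_files : Int), Dom_prioritize_md_paths_py paths prioritize_terms max_files → Spec_prioritize_md_paths_py paths prioritize_terms max_files (prioritize_md_paths_py paths prioritize_terms max_files)

-- ===== LEMMAS AND PROOFS =====

-- the (non-strict) lexicographic order A's tuple sort realises on (−score, path) pairs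
def pvR (a b : Int × String) : Prop := a.1 < b.1 ∨ (a.1 = b.1 ∧ a.2 ≤ b.2)

theorem pvR_antisymm (a b : Int × String) (h1 : pvR a b) (h2 : pvR b a) : a = b := by
  rcases h1 with h1 | ⟨h1, h1'⟩
  · rcases h2 with h2 | ⟨h2, h2'⟩
    · exact absurd h1 (lt_asymm h2)
    · exact absurd h1 (by omega)
  · rcases h2 with h2 | ⟨h2, h2'⟩
    · exact absurd h2 (by omega)
    · exact Prod.ext h1 (le_antisymm h1' h2')

-- the Boolean "before" test sorted2 uses, specialised to fst/snd keys
def pvBefore (a b : Int × String) : Bool :=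
  decide (a.1 < b.1) || !decide (b.1 < a.1) && decide (a.2 < b.2)

theorem pvBefore_false_iff (a b : Int × String) : pvBefore a b = false ↔ pvR b a := by
  unfold pvBefore pvR
  simp only [Bool.or_eq_false_iff, Bool.and_eq_false_iff, decide_eq_false_iff_not,
    Bool.not_eq_false', decide_eq_true_eq]
  constructor
  · rintro ⟨h1, h2 | h2⟩
    · exact Or.inl h2
    · by_cases hlt : b.1 < a.1
      · exact Or.inl hlt
      · exact Or.inr ⟨by omega, le_of_not_gt h2⟩
  · rintro (h | ⟨he, hle⟩)
    · exact ⟨by omega, Or.inl h⟩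
    · exact ⟨by omega, Or.inr (not_lt_of_ge hle)⟩

theorem pvBefore_true_R (a b : Int × String) (h : pvBefore a b = true) : pvR a b := by
  unfold pvBefore at h; unfold pvR
  simp only [Bool.or_eq_true, Bool.and_eq_true, Bool.not_eq_true', decide_eq_true_eq,
    decide_eq_false_iff_not] at h
  rcases h with h | ⟨h1, h2⟩
  · exact Or.inl h
  · by_cases hlt : a.1 < b.1
    · exact Or.inl hlt
    · exact Or.inr ⟨by omega, le_of_lt h2⟩

theorem pvR_trans (a b c : Int × String) (h1 : pvR a b) (h2 : pvR b c) : pvR a c := by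
  unfold pvR at *
  rcases h1 with h1 | ⟨h1, h1'⟩ <;> rcases h2 with h2 | ⟨h2, h2'⟩
  · exact Or.inl (lt_trans h1 h2)
  · exact Or.inl (by omega)
  · exact Or.inl (by omega)
  · exact Or.inr ⟨by omega, le_trans h1' h2'⟩

theorem pv_insertBy_pairwise (x : Int × String) (acc : List (Int × String))
    (h : acc.Pairwise pvR) : (PySem.List.insertBy pvBefore x acc).Pairwise pvR := by
  induction acc with
  | nil => simp [PySem.List.insertBy]
  | cons y ys ih =>
    rw [List.pairwise_cons] at h
    by_cases hb : pvBefore x y = true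
    · have hxy : pvR x y := pvBefore_true_R x y hb
      simp only [PySem.List.insertBy, hb, if_true]
      refine List.pairwise_cons.2 ⟨?_, List.pairwise_cons.2 ⟨h.1, h.2⟩⟩
      intro z hz
      rcases List.mem_cons.1 hz with rfl | hz'
      · exact hxy
      · exact pvR_trans x y z hxy (h.1 z hz')
    · have hyx : pvR y x := (pvBefore_false_iff x y).1 (by revert hb; cases pvBefore x y <;> simp)
      simp only [PySem.List.insertBy, hb]
      refine List.pairwise_cons.2 ⟨?_, ih h.2⟩
      intro z hz
      rcases (PySem.List.mem_insertBy pvBefore x z ys).1 hz with rfl | hz'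
      · exact hyx
      · exact h.1 z hz'

theorem pv_sorted2_pairwise (xs : List (Int × String)) :
    (PySem.List.sorted2 xs Prod.fst Prod.snd).Pairwise pvR := by
  show (xs.foldl (fun acc x => PySem.List.insertBy pvBefore x acc) []).Pairwise pvR
  have H : ∀ (l : List (Int × String)) (acc : List (Int × String)), acc.Pairwise pvR →
      (l.foldl (fun acc x => PySem.List.insertBy pvBefore x acc) acc).Pairwise pvR := by
    intro l
    induction l with
    | nil => intro acc h; exact h
    | cons x l ih => intro acc h; exact ih _ (pv_insertBy_pairwise x acc h)
  exact H xs [] List.Pairwise.nil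

-- any pvR-pairwise permutation of xs IS sorted2 xs fst snd
theorem pv_sorted2_eq (xs ys : List (Int × String)) (hp : ys.Perm xs)
    (hs : ys.Pairwise pvR) : PySem.List.sorted2 xs Prod.fst Prod.snd = ys := by
  have h1 := pv_sorted2_pairwise xs
  have hperm : (PySem.List.sorted2 xs Prod.fst Prod.snd).Perm ys :=
    (PySem.List.sorted2_perm xs Prod.fst Prod.snd false).trans hp.symm
  exact List.Perm.eq_of_pairwise (fun a b _ _ ha hb => pvR_antisymm a b ha hb) h1 hs hperm

-- flatMap of per-score filters over a covering Nodup score list is a permutation of the list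
theorem pv_flatMap_filter_perm (σ : String → Int) (ss : List Int) (hnd : ss.Nodup) :
    ∀ (L : List String), (∀ p ∈ L, σ p ∈ ss) →
      (ss.flatMap (fun s => L.filter (fun p => σ p == s))).Perm L := by
  induction ss with
  | nil =>
    intro L hcov
    have : L = [] := List.eq_nil_iff_forall_not_mem.2
      (fun p hp => absurd (hcov p hp) List.not_mem_nil)
    simp [this]
  | cons s ss ih =>
    intro L hcov
    rw [List.flatMap_cons]
    have hnd' : ss.Nodup := (List.nodup_cons.1 hnd).2
    have hsn : s ∉ ss := (List.nodup_cons.1 hnd).1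
    have hcong : ss.flatMap (fun s' => L.filter (fun p => σ p == s')) =
        ss.flatMap (fun s' => (L.filter (fun p => !(σ p == s))).filter (fun p => σ p == s')) := by
      apply List.flatMap_congr
      intro s' hs'
      have hne : s' ≠ s := fun h => hsn (h ▸ hs')
      rw [List.filter_filter]
      apply List.filter_congr
      intro p _
      by_cases hps' : σ p = s'
      · simp [hps']
        exact hne
      · have : (σ p == s') = false := beq_eq_false_iff_ne.2 hps'
        simp [this]
    rw [hcong]
    have hperm := ih hnd' (L.filter (fun p => !(σ p == s)))
      (by intro p hp
          have hmem := hcov p (List.mem_of_mem_filter hp)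
          have hne : ¬ (σ p == s) = true := by
            have := List.of_mem_filter hp; simpa using this
          rcases List.mem_cons.1 hmem with h | h
          · exact absurd (by simp [h]) hne
          · exact h)
    refine (List.Perm.append_left _ hperm).trans ?_
    exact List.filter_append_perm _ L

-- main bridge: A's sorted-pairs pipeline equals B's sort-first-then-filter-by-score pipeline
theorem pv_main (σ : String → Int) (paths : List String) :
    (PySem.List.sorted2 (paths.map (fun p => (-(σ p), p))) Prod.fst Prod.snd).map Prod.snd =
    (PySem.List.sorted (PySem.Set.ofList ((PySem.List.sorted paths (fun x => x)).map σ)) (fun s => s) true).flatMap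
      (fun s => (PySem.List.sorted paths (fun x => x)).filter (fun p => σ p == s)) := by
  set f : String → Int × String := fun p => (-(σ p), p) with hf
  set L := PySem.List.sorted paths (fun x => x) with hL
  set ss := PySem.List.sorted (PySem.Set.ofList (L.map σ)) (fun s => s) true with hss
  set B := ss.flatMap (fun s => L.filter (fun p => σ p == s)) with hB
  have hbucket : ∀ s : Int, ∀ p ∈ L.filter (fun p => σ p == s), σ p = s := by
    intro s p hp
    have := List.of_mem_filter hp; simpa using this
  -- ss is strictly decreasing
  have hssnd : ss.Nodup := (PySem.List.sorted_perm _ _ _).nodup_iff.2 (PySem.Set.nodup_ofList _)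
  have hssge : ss.Pairwise (fun a b : Int => b ≤ a) := PySem.List.sorted_pairwise_rev _ _
  have hssgt : ss.Pairwise (fun a b : Int => b < a) :=
    (List.Pairwise.and hssnd hssge).imp
      (fun h => lt_of_le_of_ne h.2 (fun he => h.1 he.symm))
  -- L is alphabetically sorted, hence so is each filter of it
  have hLpw : L.Pairwise (fun a b : String => a ≤ b) := PySem.List.sorted_pairwise paths (fun x => x)
  -- B decorated with f is pvR-pairwise
  have hpair : (B.map f).Pairwise pvR := by
    rw [hB, List.map_flatMap]
    refine List.pairwise_flatMap.2 ⟨?_, ?_⟩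
    · intro s hs
      rw [List.pairwise_map]
      refine List.Pairwise.imp_of_mem ?_ (hLpw.filter _)
      intro a b ha hb hle
      exact Or.inr ⟨by simp [f, hbucket s a ha, hbucket s b hb], hle⟩
    · refine List.Pairwise.imp_of_mem ?_ hssgt
      intro s1 s2 h1 h2 hlt x hx y hy
      obtain ⟨p, hp, rfl⟩ := List.mem_map.1 hx
      obtain ⟨q, hq, rfl⟩ := List.mem_map.1 hy
      refine Or.inl ?_
      show -(σ p) < -(σ q)
      rw [hbucket s1 p hp, hbucket s2 q hq]
      omega
  -- B is a permutation of paths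
  have hpermB : B.Perm paths := by
    rw [hB]
    refine (pv_flatMap_filter_perm σ ss hssnd L ?_).trans (PySem.List.sorted_perm paths (fun x => x) false)
    intro p hp
    rw [hss]
    exact (PySem.List.mem_sorted _ _ _ _).2
      ((PySem.Set.mem_ofList _ _).2 (List.mem_map_of_mem hp))
  have heq := pv_sorted2_eq (paths.map f) (B.map f) (hpermB.map f) hpair
  rw [heq, List.map_map]
  rw [show (Prod.snd ∘ f) = id from rfl, List.map_id]

-- B's scores agree with A's: counting by foldl equals length of the filter
theorem pv_foldl_count (P : String → Bool) (l : List String) (a : Int) :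
    l.foldl (fun acc t => if P t then acc + 1 else acc) a = a + ((l.filter P).length : Int) := by
  induction l generalizing a with
  | nil => simp
  | cons t ts ih =>
    by_cases h : P t
    · simp only [List.foldl_cons, List.filter_cons, h, if_true, ih, List.length_cons]
      push_cast; ring
    · simp [List.foldl_cons, h, ih]

theorem pv_score_eq (tlow : List String) (p : String) : pvScoreB tlow p = pvScore tlow p := by
  unfold pvScore pvScoreB
  rw [pv_foldl_count (fun t => PySem.Str.isIn t (PySem.Str.lower p)) tlow 0]
  simp

-- B's tlow (filterMap form) agrees with A's (filter-then-map form)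
theorem pv_tlow_eq (ts : List String) :
    ts.filterMap (fun t => if 2 ≤ PySem.Str.len t then some (PySem.Str.lower t) else none) = pvTlow ts := by
  unfold pvTlow
  induction ts with
  | nil => rfl
  | cons t ts ih =>
    by_cases h : 2 ≤ PySem.Str.len t
    · rw [show List.filterMap (fun t => if 2 ≤ PySem.Str.len t then some (PySem.Str.lower t) else none) (t :: ts)
            = PySem.Str.lower t :: List.filterMap (fun t => if 2 ≤ PySem.Str.len t then some (PySem.Str.lower t) else none) ts
          from List.filterMap_cons_some (h := if_pos h),
        List.filter_cons_of_pos (by simpa using h), List.map_cons, ih]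
    · rw [show List.filterMap (fun t => if 2 ≤ PySem.Str.len t then some (PySem.Str.lower t) else none) (t :: ts)
            = List.filterMap (fun t => if 2 ≤ PySem.Str.len t then some (PySem.Str.lower t) else none) ts
          from List.filterMap_cons_none (h := if_neg h),
        List.filter_cons_of_neg (by simpa using h), ih]

-- zip-with-own-scores filter = plain filter on the score
theorem pv_zip_filter (σ : String → Int) (L : List String) (s : Int) :
    ((L.zip (L.map σ)).filter (fun q => q.2 == s)).map Prod.fst = L.filter (fun p => σ p == s) := by
  induction L with
  | nil => rfl
  | cons p L ih =>
    by_cases h : σ p = s <;>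
      simp [List.zip_cons_cons, h, ih]

-- ===== VERDICT (by name: the statement is the Claim_ definition above) =====
theorem prioritize_md_paths_py_spec : Claim_equal_prioritize_md_paths_py := by
  intro paths terms max_files _
  show prioritize_md_paths_py paths terms max_files = prioritize_md_paths_py_alt paths terms max_files
  unfold prioritize_md_paths_py prioritize_md_paths_py_alt
  by_cases h0 : paths = [] ∨ max_files ≤ 0
  · simp [h0]
  · simp only [h0, if_false]
    cases terms with
    | none => rfl
    | some ts =>
      by_cases hts : ts = []
      · simp [hts]
      · simp only [hts, if_false]
        rw [pv_tlow_eq]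
        set tlow := pvTlow ts
        set σ := pvScore tlow with hσ
        congr 1
        rw [show (fun p => pvScoreB tlow p) = σ from funext (fun p => pv_score_eq tlow p)]
        rw [PySem.List.foldl_append_singleton_eq_map, List.nil_append]
        rw [PySem.List.foldl_append_eq_flatMap, List.nil_append]
        rw [show (fun s => ((( PySem.List.sorted paths (fun x => x)).zip ((PySem.List.sorted paths (fun x => x)).map σ)).filter (fun q => q.2 == s)).map Prod.fst)
              = (fun s => (PySem.List.sorted paths (fun x => x)).filter (fun p => σ p == s))
          from funext (fun s => pv_zip_filter σ (PySem.List.sorted paths (fun x => x)) s)]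
        exact pv_main σ paths
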